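-- pv_equiv track=rewrite | github.com/lin/lin.github.io | content/cs/cp/cf/others/polynomial/2022/c.py | solve
-- ===== SOURCE A (Python) =====
-- def solve(n, s):
--
--     res = []
--     count = 0
--     di = None
--     for i, ch in enumerate(s):
--         if i == 0:
--             di = ch
--             count = 1
--             res.append(1)
--         else:
--             if ch == di:
--                 count += 1
--             else:
--                 count = 1
--                 di = ch
--             res.append(i+2-count)
--     return res
-- ===== SOURCE B (Python) =====
-- def solve(n, s):
--     res = []
--     m = len(s)
--     i = 0
--     while i < m:
--         j = i + 1
--         while j < m and s[j] == s[i]: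
--             j += 1
--         res += [i + 1] * (j - i)
--         i = j
--     return res
-- ===== Notes on version B (the rewrite author's own statement) =====
-- stated objective: alternative
-- what changed: B scans maximal runs with a two-pointer (inner scan to the run end, then a batch fill of the run's 1-indexed start position), instead of A's per-character state machine that maintains a run counter and last char and computes i+2-count at every index.
import Mathlib
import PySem

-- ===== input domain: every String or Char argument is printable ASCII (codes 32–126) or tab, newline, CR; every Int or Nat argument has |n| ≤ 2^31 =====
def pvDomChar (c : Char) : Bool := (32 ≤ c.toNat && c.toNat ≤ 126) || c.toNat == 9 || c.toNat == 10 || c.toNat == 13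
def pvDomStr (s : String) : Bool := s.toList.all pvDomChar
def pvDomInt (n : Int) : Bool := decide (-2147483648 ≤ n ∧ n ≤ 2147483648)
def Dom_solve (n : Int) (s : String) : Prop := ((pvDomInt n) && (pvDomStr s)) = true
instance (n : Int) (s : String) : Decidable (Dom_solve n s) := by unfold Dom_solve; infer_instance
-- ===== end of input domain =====

-- B replaces A's per-character run-counter state machine by a two-pointer scan over maximal
-- runs that batch-fills each run with its 1-indexed start position (objective: alternative).

-- ===== PORT A =====
-- loop body of A's for-loop; state = (res, count, di)
def aStep (st : List Int × Int × Option Char) (p : Int × Char) : List Int × Int × Option Char :=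
  if p.1 = 0 then (st.1 ++ [(1 : Int)], 1, some p.2)
  else
    let cd : Int × Option Char :=
      if (some p.2 : Option Char) = st.2.2 then (st.2.1 + 1, st.2.2) else (1, some p.2)
    (st.1 ++ [p.1 + 2 - cd.1], cd.1, cd.2)

def solve (n : Int) (s : String) : List Int :=
  ((PySem.List.enumerate s.toList 0).foldl aStep ([], 0, none)).1

-- ===== PORT B =====
-- inner while of B: advance j while j < len(s) and s[j] == s[i]  (c = s[i] as an optional char)
def bScan (cs : List Char) (c : Option Char) (j : Int) : Int :=
  if h : j < (cs.length : Int) ∧ PySem.List.pyGet? cs j = c then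
    bScan cs c (j + 1)
  else j
termination_by ((cs.length : Int) - j).toNat
decreasing_by omega

-- needed by bOuter's termination argument
lemma bScan_ge (cs : List Char) (c : Option Char) (j : Int) : j ≤ bScan cs c j := by
  fun_induction bScan with
  | case1 j h ih => omega
  | case2 j h => omega

-- outer while of B: one iteration per maximal run; 'res += [i+1]*(j-i)' is the pyRepeat append
def bOuter (cs : List Char) (i : Int) : List Int :=
  if h : i < (cs.length : Int) then
    PySem.List.pyRepeat [i + 1] (bScan cs (PySem.List.pyGet? cs i) (i + 1) - i) ++
      bOuter cs (bScan cs (PySem.List.pyGet? cs i) (i + 1))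
  else []
termination_by ((cs.length : Int) - i).toNat
decreasing_by
  have := bScan_ge cs (PySem.List.pyGet? cs i) (i + 1)
  omega

def solve_alt (n : Int) (s : String) : List Int := bOuter s.toList 0

-- ===== PRECONDITION & SPEC =====
def Spec_solve (n : Int) (s : String) (out : List Int) : Prop := out = solve_alt n s
instance (n : Int) (s : String) (out : List Int) : Decidable (Spec_solve n s out) := by unfold Spec_solve; infer_instance

-- ===== CLAIM (what is proved, stated in full; the proofs are below) =====
def Claim_equal_solve : Prop := ∀ (n : Int) (s : String), Dom_solve n s → Spec_solve n s (solve n s)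

-- ===== LEMMAS AND PROOFS =====

-- canonical run expansion: for each maximal run, its 1-indexed start repeated run-length times
def fillRuns : List Char → Int → List Int
  | [], _ => []
  | c :: rest, pos =>
      List.replicate ((rest.takeWhile (fun x => x == c)).length + 1) pos ++
        fillRuns (rest.dropWhile (fun x => x == c))
          (pos + ((rest.takeWhile (fun x => x == c)).length + 1))
termination_by l => l.length
decreasing_by
  have := List.length_dropWhile_le (fun x => x == c) rest
  simp; omega

lemma dropWhile_eq_drop_takeWhile {α : Type} (p : α → Bool) (l : List α) :
    l.dropWhile p = l.drop (l.takeWhile p).length := by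
  induction l with
  | nil => rfl
  | cons x xs ih =>
      by_cases h : p x
      · simp [h, ih]
      · simp [h]

lemma bScan_eq (cs : List Char) (a : Char) (j : Int) (h0 : 0 ≤ j) :
    bScan cs (some a) j
      = j + ((cs.drop j.toNat).takeWhile (fun x => x == a)).length := by
  fun_induction bScan with
  | case1 j h ih =>
      have hj : j.toNat < cs.length := by omega
      have hg : PySem.List.pyGet? cs j = some cs[j.toNat] :=
        PySem.List.pyGet?_eq_some_getElem cs h0 h.1
      have hx : cs[j.toNat] = a := by
        have := h.2; rw [hg] at this; exact Option.some.inj this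
      rw [List.drop_eq_getElem_cons hj]
      have h1 : (0 : Int) ≤ j + 1 := by omega
      rw [ih h1]
      have : (j + 1).toNat = j.toNat + 1 := by omega
      rw [this]
      simp [List.takeWhile_cons, hx]
      omega
  | case2 j h =>
      by_cases hj : j < (cs.length : Int)
      · have hj' : j.toNat < cs.length := by omega
        have hg : PySem.List.pyGet? cs j = some cs[j.toNat] :=
          PySem.List.pyGet?_eq_some_getElem cs h0 hj
        have hx : ¬ (cs[j.toNat] = a) := by
          intro hc
          exact h ⟨hj, by rw [hg, hc]⟩
        rw [List.drop_eq_getElem_cons hj']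
        simp [List.takeWhile_cons, hx]
      · have : cs.length ≤ j.toNat := by omega
        rw [List.drop_eq_nil_of_le this]
        simp

lemma bOuter_eq (cs : List Char) (i : Int) (h0 : 0 ≤ i) :
    bOuter cs i = fillRuns (cs.drop i.toNat) (i + 1) := by
  fun_induction bOuter with
  | case1 i h ih =>
      have hi : i.toNat < cs.length := by omega
      have hg : PySem.List.pyGet? cs i = some cs[i.toNat] :=
        PySem.List.pyGet?_eq_some_getElem cs h0 h
      set a := cs[i.toNat] with ha
      have hscan : bScan cs (PySem.List.pyGet? cs i) (i + 1)
          = (i + 1) + (((cs.drop (i + 1).toNat).takeWhile (fun x => x == a)).length : Int) := by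
        rw [hg]; exact bScan_eq cs a (i + 1) (by omega)
      set t := ((cs.drop (i + 1).toNat).takeWhile (fun x => x == a)).length with ht
      have hge := bScan_ge cs (PySem.List.pyGet? cs i) (i + 1)
      rw [ih (by omega), hscan]
      have hdropi : cs.drop i.toNat = a :: cs.drop (i.toNat + 1) := by
        rw [ha]; exact List.drop_eq_getElem_cons hi
      have hi1 : (i + 1).toNat = i.toNat + 1 := by omega
      rw [hi1] at ht
      rw [hdropi, fillRuns, PySem.List.pyRepeat_singleton]
      have hrt : ((i + 1 + (t : Int)) - i).toNat = t + 1 := by omega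
      have hjN : (i + 1 + (t : Int)).toNat = i.toNat + 1 + t := by omega
      rw [hrt, hjN]
      have hdropj : cs.drop (i.toNat + 1 + t)
          = (cs.drop (i.toNat + 1)).dropWhile (fun x => x == a) := by
        rw [dropWhile_eq_drop_takeWhile, ← ht, List.drop_drop]
      rw [hdropj, ← ht]
      congr 2
      ring
  | case2 i h =>
      have : cs.length ≤ i.toNat := by omega
      rw [List.drop_eq_nil_of_le this]
      simp [fillRuns]

lemma aLoop (rest : List Char) : ∀ (prev : Char) (i count : Int) (res : List Int), 0 ≤ i →
    ((PySem.List.enumerate rest (i + 1)).foldl aStep (res, count, some prev)).1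
      = res ++ List.replicate ((rest.takeWhile (fun x => x == prev)).length) (i + 2 - count)
          ++ fillRuns (rest.dropWhile (fun x => x == prev))
              (i + 2 + ((rest.takeWhile (fun x => x == prev)).length : Int)) := by
  induction rest with
  | nil => intro prev i count res h0; simp [PySem.List.enumerate_nil, fillRuns]
  | cons c rest ih =>
      intro prev i count res h0
      rw [PySem.List.enumerate_cons]
      by_cases hc : c = prev
      · subst hc
        have hstep : aStep (res, count, some c) (i + 1, c)
            = (res ++ [i + 2 - count], count + 1, some c) := by
          simp [aStep, show ¬ (i + 1 = 0) by omega]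
          omega
        rw [List.foldl_cons, hstep]
        rw [ih c (i + 1) (count + 1) (res ++ [i + 2 - count]) (by omega)]
        simp only [List.takeWhile_cons, List.dropWhile_cons, beq_self_eq_true, if_true,
          List.length_cons]
        rw [show (i + 1 + 2 - (count + 1) : Int) = i + 2 - count by ring]
        push_cast
        rw [show (i + 1 + 2 + ((List.takeWhile (fun x => x == c) rest).length : Int))
              = i + 2 + (((List.takeWhile (fun x => x == c) rest).length : Int) + 1) by ring]
        simp [List.replicate_succ, List.append_assoc]
      · have hstep : aStep (res, count, some prev) (i + 1, c)
            = (res ++ [i + 2], 1, some c) := by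
          simp [aStep, show ¬ (i + 1 = 0) by omega, hc]
          ring
        rw [List.foldl_cons, hstep]
        rw [ih c (i + 1) 1 (res ++ [i + 2]) (by omega)]
        have hb : (c == prev) = false := by simp [hc]
        simp only [List.takeWhile_cons, List.dropWhile_cons, hb, Bool.false_eq_true, if_false,
          List.length_nil, List.replicate_zero, List.nil_append, Nat.cast_zero, add_zero]
        rw [fillRuns]
        rw [show (i + 1 + 2 - 1 : Int) = i + 2 by ring]
        rw [show (i + 1 + 2 + ((List.takeWhile (fun x => x == c) rest).length : Int))
              = i + 2 + (((List.takeWhile (fun x => x == c) rest).length : Int) + 1) by ring]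
        simp [List.replicate_succ, List.append_assoc]

lemma solve_eq_fillRuns (n : Int) (s : String) : solve n s = fillRuns s.toList 1 := by
  unfold solve
  cases h : s.toList with
  | nil => simp [PySem.List.enumerate_nil, fillRuns]
  | cons c rest =>
      rw [PySem.List.enumerate_cons, List.foldl_cons]
      have hstep : aStep ([], 0, none) (0, c) = ([(1 : Int)], 1, some c) := by
        simp [aStep]
      rw [hstep]
      simp only [zero_add]
      have h1 := aLoop rest c 0 1 [(1 : Int)] (by omega)
      rw [show ((0 : Int) + 1) = 1 by norm_num] at h1
      rw [h1, fillRuns]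
      rw [show ((0 : Int) + 2 - 1) = 1 by ring]
      push_cast
      rw [show ((2 : Int) + ((List.takeWhile (fun x => x == c) rest).length : Int))
            = 1 + (((List.takeWhile (fun x => x == c) rest).length : Int) + 1) by ring]
      simp [List.replicate_succ, List.append_assoc]

lemma solve_alt_eq_fillRuns (n : Int) (s : String) : solve_alt n s = fillRuns s.toList 1 := by
  unfold solve_alt
  rw [bOuter_eq s.toList 0 (by omega)]
  simp

-- ===== VERDICT (by name: the statement is the Claim_ definition above) =====
theorem solve_spec : Claim_equal_solve := by
  intro n s _
  show solve n s = solve_alt n s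
  rw [solve_eq_fillRuns, solve_alt_eq_fillRuns]
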